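-- pv_equiv track=rewrite | github.com/rooeinfn86/MSys | cisco_ai_backend/app/utils/topology_utils.py | find_network_path
-- ===== SOURCE A (Python) =====
-- from typing import List, Optional, Dict, Any, Tuple, Set
-- from collections import defaultdict, deque
--
-- def find_network_path(
--     start_device: str,
--     end_device: str,
--     relationships: Dict[str, List[Dict[str, Any]]]
-- ) -> Optional[List[str]]:
--     """Find network path between two devices using BFS."""
--     if start_device == end_device:
--         return [start_device]
--
--     if start_device not in relationships or end_device not in relationships:
--         return None
--
--     # Use BFS to find shortest path
--     queue = deque([(start_device, [start_device])])
--     visited = set()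
--
--     while queue:
--         current_device, path = queue.popleft()
--
--         if current_device in visited:
--             continue
--
--         visited.add(current_device)
--
--         # Check all connections from current device
--         for connection in relationships.get(current_device, []):
--             next_device = connection['connected_device']
--
--             if next_device == end_device:
--                 return path + [next_device]
--
--             if next_device not in visited:
--                 queue.append((next_device, path + [next_device]))
--
--     return None
-- ===== SOURCE B (Python) =====
-- def find_network_path(start_device, end_device, relationships):
--     """Level-synchronous BFS (whole frontier per round) with parent pointers;
--     the path is reconstructed once, when the target is first seen."""
--     if start_device == end_device:
--         return [start_device]
--
--     if not (start_device in relationships and end_device in relationships):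
--         return None
--
--     parent = {}
--     seen = {start_device}
--     frontier = [start_device]
--
--     while frontier:
--         next_frontier = []
--         for current in frontier:
--             for connection in relationships.get(current, []):
--                 next_device = connection['connected_device']
--
--                 if next_device == end_device:
--                     # walk the parent pointers back to the start, once
--                     path = [next_device]
--                     node = current
--                     while node != start_device:
--                         path.append(node)
--                         node = parent[node]
--                     path.append(start_device)
--                     return path[::-1]
--
--                 if next_device not in seen:
--                     seen.add(next_device)
--                     parent[next_device] = current
--                     next_frontier.append(next_device)
--         frontier = next_frontier
--
--     return None
-- ===== Notes on version B (the rewrite author's own statement) =====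
-- stated objective: alternative
-- what changed: Replaced the deque BFS that copies the whole path into every queue entry (deduplicating only at pop time) with a level-synchronous BFS over whole frontier lists that marks nodes at enqueue time and records parent pointers, reconstructing the path once when the target is found; this removes the per-edge path copy at the cost of one final reconstruction pass.
import Mathlib
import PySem

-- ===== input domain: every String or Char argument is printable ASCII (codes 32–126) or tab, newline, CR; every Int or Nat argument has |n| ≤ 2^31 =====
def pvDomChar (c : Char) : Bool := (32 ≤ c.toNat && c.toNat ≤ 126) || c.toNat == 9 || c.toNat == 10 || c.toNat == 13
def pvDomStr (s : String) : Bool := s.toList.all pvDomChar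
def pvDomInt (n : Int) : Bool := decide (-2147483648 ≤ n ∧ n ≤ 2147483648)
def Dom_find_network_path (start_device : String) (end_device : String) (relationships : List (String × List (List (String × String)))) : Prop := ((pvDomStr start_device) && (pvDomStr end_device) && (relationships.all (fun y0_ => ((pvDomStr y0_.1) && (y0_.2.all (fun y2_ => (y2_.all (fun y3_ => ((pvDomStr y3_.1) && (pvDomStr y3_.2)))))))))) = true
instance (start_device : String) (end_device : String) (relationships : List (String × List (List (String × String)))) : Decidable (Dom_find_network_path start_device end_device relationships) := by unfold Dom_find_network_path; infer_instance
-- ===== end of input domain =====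

-- B replaces A's path-copying deque BFS by a level-synchronous BFS (whole frontier per round,
-- parent pointers, one reconstruction pass): a structurally different traversal, same return value.

-- shared one-line accessor: conn['connected_device']; Python raises KeyError when the key is
-- missing (those inputs are excluded by Pre_ below), the port reads "" there in both ports.
def connectedDevice (conn : List (String × String)) : String :=
  (PySem.Dict.get? (⟨conn⟩ : PySem.Dict String String) "connected_device").getD ""

-- total number of connection entries: an upper bound used as fuel by both loop ports
def totalConns (relationships : List (String × List (List (String × String)))) : Nat :=
  (relationships.map (fun pr => pr.2.length)).sum

-- ===== PORT A =====
-- the inner 'for connection in relationships.get(current_device, [])' with its early return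
def scanA (end_device : String) (visited : PySem.Set String) (path : List String) :
    List (List (String × String)) → List (String × List String) →
    Sum (List String) (List (String × List String))
  | [], acc => .inr acc
  | conn :: rest, acc =>
    let next_device := connectedDevice conn
    if next_device = end_device then .inl (path ++ [next_device])
    else if PySem.Set.contains visited next_device then scanA end_device visited path rest acc
    else scanA end_device visited path rest (acc ++ [(next_device, path ++ [next_device])])

-- the 'while queue' loop of A; fuel is a totality guard only (totalConns+1 pops always suffice)
def loopA (end_device : String) (relationships : List (String × List (List (String × String)))) :
    Nat → List (String × List String) → PySem.Set String → Option (List String)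
  | 0, _, _ => none
  | _ + 1, [], _ => none
  | fuel + 1, (current_device, path) :: qs, visited =>
    if PySem.Set.contains visited current_device then loopA end_device relationships fuel qs visited
    else
      let visited' := PySem.Set.add visited current_device
      match scanA end_device visited' path
          ((PySem.Dict.get? (⟨relationships⟩ : PySem.Dict String (List (List (String × String)))) current_device).getD []) [] with
      | .inl res => some res
      | .inr newq => loopA end_device relationships fuel (qs ++ newq) visited'

def find_network_path (start_device : String) (end_device : String) (relationships : List (String × List (List (String × String)))) : Option (List String) :=
  if start_device = end_device then some [start_device]
  else if !(PySem.Dict.contains (⟨relationships⟩ : PySem.Dict String (List (List (String × String)))) start_device)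
       || !(PySem.Dict.contains (⟨relationships⟩ : PySem.Dict String (List (List (String × String)))) end_device) then none
  else loopA end_device relationships (totalConns relationships + 1) [(start_device, [start_device])] PySem.Set.empty

-- ===== PORT B =====
-- Source B's 'relationships.get(current, [])'
def adjOf (relationships : List (String × List (List (String × String)))) (current : String) : List (List (String × String)) :=
  (PySem.Dict.get? (⟨relationships⟩ : PySem.Dict String (List (List (String × String)))) current).getD []

-- the 'while node != start_device' parent walk of Source B; fuel is a totality guard only
def reconLoop (parent : PySem.Dict String String) (start_device : String) :
    Nat → String → List String → List String
  | 0, _, path => path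
  | fuel + 1, node, path =>
    if node = start_device then path
    else reconLoop parent start_device fuel ((PySem.Dict.get? parent node).getD "") (path ++ [node])

-- the innermost 'for connection in relationships.get(current, [])' loop of Source B
def scanNode (start_device end_device current : String) :
    List (List (String × String)) → PySem.Dict String String → PySem.Set String → List String →
    Except (List String) (PySem.Dict String String × PySem.Set String × List String)
  | [], parent, seen, next_frontier => .ok (parent, seen, next_frontier)
  | conn :: rest, parent, seen, next_frontier =>
    let next_device := connectedDevice conn
    if next_device = end_device then
      .error ((reconLoop parent start_device (PySem.Dict.size parent + 1) current [next_device] ++ [start_device]).reverse)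
    else if PySem.Set.contains seen next_device then
      scanNode start_device end_device current rest parent seen next_frontier
    else
      scanNode start_device end_device current rest (PySem.Dict.insert parent next_device current)
        (PySem.Set.add seen next_device) (next_frontier ++ [next_device])

-- the 'for current in frontier' loop of Source B
def expand (start_device end_device : String) (relationships : List (String × List (List (String × String)))) :
    List String → PySem.Dict String String → PySem.Set String → List String →
    Except (List String) (PySem.Dict String String × PySem.Set String × List String)
  | [], parent, seen, next_frontier => .ok (parent, seen, next_frontier)
  | current :: rest, parent, seen, next_frontier =>
    match scanNode start_device end_device current (adjOf relationships current) parent seen next_frontier with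
    | .error r => .error r
    | .ok (parent', seen', nf') => expand start_device end_device relationships rest parent' seen' nf'

-- the 'while frontier' loop of Source B; fuel is a totality guard only (totalConns+2 rounds always suffice)
def levels (start_device end_device : String) (relationships : List (String × List (List (String × String)))) :
    Nat → List String → PySem.Dict String String → PySem.Set String → Option (List String)
  | 0, _, _, _ => none
  | _ + 1, [], _, _ => none
  | fuel + 1, current :: frontier_rest, parent, seen =>
    match expand start_device end_device relationships (current :: frontier_rest) parent seen [] with
    | .error r => some r
    | .ok (parent', seen', nf) => levels start_device end_device relationships fuel nf parent' seen'

def find_network_path_alt (start_device : String) (end_device : String) (relationships : List (String × List (List (String × String)))) : Option (List String) :=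
  if start_device = end_device then some [start_device]
  else if !(PySem.Dict.contains (⟨relationships⟩ : PySem.Dict String (List (List (String × String)))) start_device
         && PySem.Dict.contains (⟨relationships⟩ : PySem.Dict String (List (List (String × String)))) end_device) then none
  else levels start_device end_device relationships (totalConns relationships + 2) [start_device]
         PySem.Dict.empty (PySem.Set.add PySem.Set.empty start_device)

-- ===== PRECONDITION & SPEC =====
-- Pre_ excludes inputs on which Python A raises KeyError (a connection dict without the key
-- 'connected_device' reached by the BFS); it is stated over ALL connection dicts except when an
-- early return makes none of them read, so it also excludes some inputs A returns on (where the
-- bad dict sits after the answer or in an unreached part of the graph) — see claim.json "cites".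
def Pre_find_network_path (start_device : String) (end_device : String) (relationships : List (String × List (List (String × String)))) : Prop :=
  start_device = end_device ∨
  (PySem.Dict.contains (⟨relationships⟩ : PySem.Dict String (List (List (String × String)))) start_device) = false ∨
  (PySem.Dict.contains (⟨relationships⟩ : PySem.Dict String (List (List (String × String)))) end_device) = false ∨
  (∀ pr ∈ relationships, ∀ conn ∈ pr.2,
    (PySem.Dict.get? (⟨conn⟩ : PySem.Dict String String) "connected_device").isSome = true)
instance (start_device : String) (end_device : String) (relationships : List (String × List (List (String × String)))) : Decidable (Pre_find_network_path start_device end_device relationships) := by unfold Pre_find_network_path; infer_instance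
def pvWitness_find_network_path : String × String × (List (String × List (List (String × String)))) :=
  ("a", "c", [("a", [[("connected_device", "b")]]), ("b", [[("connected_device", "c")]]), ("c", [])])

def Spec_find_network_path (start_device : String) (end_device : String) (relationships : List (String × List (List (String × String)))) (out : Option (List String)) : Prop := out = find_network_path_alt start_device end_device relationships
instance (start_device : String) (end_device : String) (relationships : List (String × List (List (String × String)))) (out : Option (List String)) : Decidable (Spec_find_network_path start_device end_device relationships out) := by unfold Spec_find_network_path; infer_instance

-- ===== CLAIM (what is proved, stated in full; the proofs are below) =====
def Claim_equal_find_network_path : Prop := ∀ (start_device : String) (end_device : String) (relationships : List (String × List (List (String × String)))), Dom_find_network_path start_device end_device relationships → Pre_find_network_path start_device end_device relationships → Spec_find_network_path start_device end_device relationships (find_network_path start_device end_device relationships)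

-- ===== LEMMAS AND PROOFS =====

-- `eff v qa` = the entries of A's queue qa that A will actually process (first entry per node,
-- nodes already in v dropped); `effAcc` is the accumulated "dropped-against" set.
def eff (v : List String) : List (String × List String) → List (String × List String)
  | [] => []
  | (n, p) :: t => if n ∈ v then eff v t else (n, p) :: eff (n :: v) t

def effAcc (v : List String) : List (String × List String) → List String
  | [] => v
  | (n, _) :: t => if n ∈ v then effAcc v t else effAcc (n :: v) t

def nodesOf (xs : List (String × List String)) : List String := xs.map Prod.fst

-- `Chain parent start n p`: p is a duplicate-free path from start to n along parent pointers.
inductive Chain (parent : PySem.Dict String String) (start : String) : String → List String → Prop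
  | base : Chain parent start start [start]
  | step {n pn : String} {p : List String} :
      Chain parent start pn p → PySem.Dict.get? parent n = some pn → n ∉ p →
      Chain parent start n (p ++ [n])

def weightA (relationships : List (String × List (List (String × String)))) (v : List String) : Nat :=
  ((relationships.filter (fun pr => !(decide (pr.1 ∈ v)))).map (fun pr => pr.2.length)).sum

def uniVals (relationships : List (String × List (List (String × String)))) : List String :=
  relationships.flatMap (fun pr => pr.2.map connectedDevice)

def remB (relationships : List (String × List (List (String × String)))) (seen : List String) : Nat :=
  ((PySem.List.dedup (uniVals relationships)).filter (fun x => !(decide (x ∈ seen)))).length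

theorem chain_basic {parent start n p} (h : Chain parent start n p) :
    p ≠ [] ∧ p.getLast? = some n ∧ start ∈ p := by
  induction h with
  | base => simp
  | step hc hget hnm ih =>
    refine ⟨by simp, ?_, by simp [ih.2.2]⟩
    simp [List.getLast?_append]

theorem chain_head {parent start n p} (h : Chain parent start n p) :
    p.head? = some start := by
  induction h with
  | base => rfl
  | @step n' pn p' hc hget hnm ih =>
    obtain ⟨hne, -, -⟩ := chain_basic hc
    cases p' with
    | nil => simp at hne
    | cons a t => simpa using ih

theorem chain_sub_nodup {parent start n p} (h : Chain parent start n p) :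
    (p.drop 1) ⊆ PySem.Dict.keys parent ∧ p.Nodup := by
  induction h with
  | base => simp
  | @step n' pn p' hc hget hnm ih =>
    obtain ⟨hne, _, _⟩ := chain_basic hc
    constructor
    · have hp1 : 1 ≤ p'.length := List.length_pos_of_ne_nil hne
      rw [List.drop_append_of_le_length hp1]
      · intro x hx
        rcases List.mem_append.1 hx with h1 | h1
        · exact ih.1 h1
        · simp only [List.mem_singleton] at h1
          rw [h1]
          have hc' : PySem.Dict.contains parent n' = true := by
            cases hcc : PySem.Dict.contains parent n'
            · rw [← PySem.Dict.get?_eq_none_iff_contains] at hcc; simp_all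
            · rfl
          exact (PySem.Dict.contains_iff_mem_keys _ _).1 hc'
    · rw [List.nodup_append]
      refine ⟨ih.2, by simp, ?_⟩
      intro a ha b hb
      simp only [List.mem_singleton] at hb
      subst hb
      exact fun he => hnm (he ▸ ha)

theorem chain_length_le {parent : PySem.Dict String String} {start n p}
    (h : Chain parent start n p) (hk : (PySem.Dict.keys parent).Nodup) :
    p.length ≤ PySem.Dict.size parent + 1 := by
  obtain ⟨hsub, hnd⟩ := chain_sub_nodup h
  have h1 : (p.drop 1).length ≤ (PySem.Dict.keys parent).length :=
    List.Subperm.length_le (List.subperm_of_subset (hnd.sublist (List.drop_sublist 1 p)) hsub)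
  have h2 : (PySem.Dict.keys parent).length = PySem.Dict.size parent := by
    simp [PySem.Dict.keys, PySem.Dict.size]
  simp [List.length_drop] at h1
  omega

theorem reconLoop_eq {parent start n p} (h : Chain parent start n p) :
    ∀ fuel acc, p.length ≤ fuel + 1 →
      reconLoop parent start fuel n acc = acc ++ (p.drop 1).reverse := by
  induction h with
  | base =>
    intro fuel acc _
    cases fuel <;> simp [reconLoop]
  | @step n' pn p' hc hget hnm ih =>
    intro fuel acc hlen
    obtain ⟨hne, hlast, hstart⟩ := chain_basic hc
    have hplen : 1 ≤ p'.length := List.length_pos_of_ne_nil hne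
    simp at hlen
    cases fuel with
    | zero => omega
    | succ f =>
      have hns : n' ≠ start := fun he => hnm (he ▸ hstart)
      rw [reconLoop, if_neg hns]
      simp only [hget, Option.getD_some]
      rw [ih f (acc ++ [n']) (by omega)]
      rw [List.drop_append_of_le_length hplen]
      simp

theorem recon_path {parent start n p} (h : Chain parent start n p)
    (hk : (PySem.Dict.keys parent).Nodup) (x : String) :
    (reconLoop parent start (PySem.Dict.size parent + 1) n [x] ++ [start]).reverse = p ++ [x] := by
  rw [reconLoop_eq h _ _ (by have := chain_length_le h hk; omega)]
  have hh := chain_head h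
  cases p with
  | nil => simp at hh
  | cons a t =>
    simp only [List.head?_cons, Option.some.injEq] at hh
    subst hh
    simp

theorem chain_preserve {parent start n p} {seen : List String} {k : String} {v : String}
    (h : Chain parent start n p) (hp : ∀ x ∈ p, x ∈ seen) (hk : k ∉ seen) :
    Chain (PySem.Dict.insert parent k v) start n p := by
  induction h with
  | base => exact .base
  | @step n' pn p' hc hget hnm ih =>
    refine .step (ih fun x hx => hp x (by simp [hx])) ?_ hnm
    rw [PySem.Dict.get?_insert_of_ne _ v ?_]
    · exact hget
    · intro he; apply hk; rw [← he]; exact hp n' (by simp)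

theorem eff_congr {v w : List String} (h : ∀ x, x ∈ v ↔ x ∈ w) :
    ∀ xs, eff v xs = eff w xs := by
  intro xs
  induction xs generalizing v w with
  | nil => simp [eff]
  | cons hd t ih =>
    obtain ⟨n, p⟩ := hd
    by_cases hn : n ∈ v
    · rw [eff, eff, if_pos hn, if_pos ((h n).1 hn)]
      exact ih h
    · rw [eff, eff, if_neg hn, if_neg (fun hw => hn ((h n).2 hw))]
      exact congrArg _ (ih (by intro x; simp [h x]))

theorem effAcc_mem (v : List String) :
    ∀ xs x, x ∈ effAcc v xs ↔ x ∈ v ∨ x ∈ nodesOf (eff v xs) := by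
  intro xs
  induction xs generalizing v with
  | nil => simp [effAcc, eff, nodesOf]
  | cons hd t ih =>
    obtain ⟨n, p⟩ := hd
    intro x
    by_cases hn : n ∈ v
    · rw [effAcc, eff, if_pos hn, if_pos hn]
      exact ih v x
    · rw [effAcc, eff, if_neg hn, if_neg hn]
      rw [ih (n :: v) x]
      simp [nodesOf]
      tauto

theorem eff_append (v : List String) :
    ∀ xs ys, eff v (xs ++ ys) = eff v xs ++ eff (effAcc v xs) ys := by
  intro xs
  induction xs generalizing v with
  | nil => simp [eff, effAcc]
  | cons hd t ih =>
    obtain ⟨n, p⟩ := hd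
    intro ys
    by_cases hn : n ∈ v
    · rw [List.cons_append, eff, effAcc, if_pos hn, if_pos hn, eff, if_pos hn, ih]
    · rw [List.cons_append, eff, effAcc, if_neg hn, if_neg hn, eff, if_neg hn, ih]
      simp

theorem scanA_acc (e : String) (vis : PySem.Set String) (p : List String) :
    ∀ adj acc, scanA e vis p adj acc =
      match scanA e vis p adj [] with
      | .inl r => .inl r
      | .inr l => .inr (acc ++ l) := by
  intro adj
  induction adj with
  | nil => intro acc; simp [scanA]
  | cons conn rest ih =>
    intro acc
    simp only [scanA]
    by_cases h1 : connectedDevice conn = e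
    · simp [h1]
    · rw [if_neg h1, if_neg h1]
      by_cases h2 : PySem.Set.contains vis (connectedDevice conn) = true
      · simp only [h2, if_true]
        exact ih acc
      · simp only [h2, Bool.false_eq_true, if_false]
        rw [ih (acc ++ [(connectedDevice conn, p ++ [connectedDevice conn])])]
        simp only [List.nil_append]
        rw [ih [(connectedDevice conn, p ++ [connectedDevice conn])]]
        cases scanA e vis p rest [] <;> simp

theorem scanNode_acc (s e cur : String) :
    ∀ adj parent seen nf, scanNode s e cur adj parent seen nf =
      match scanNode s e cur adj parent seen [] with
      | .error r => .error r
      | .ok (p', s', l) => .ok (p', s', nf ++ l) := by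
  intro adj
  induction adj with
  | nil => intro parent seen nf; simp [scanNode]
  | cons conn rest ih =>
    intro parent seen nf
    simp only [scanNode]
    by_cases h1 : connectedDevice conn = e
    · simp [h1]
    · rw [if_neg h1, if_neg h1]
      by_cases h2 : PySem.Set.contains seen (connectedDevice conn) = true
      · simp only [h2, if_true]
        exact ih parent seen nf
      · simp only [h2, Bool.false_eq_true, if_false]
        rw [ih _ _ (nf ++ [connectedDevice conn])]
        simp only [List.nil_append]
        rw [ih _ _ [connectedDevice conn]]
        rcases scanNode s e cur rest (PySem.Dict.insert parent (connectedDevice conn) cur)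
          (PySem.Set.add seen (connectedDevice conn)) [] with r | ⟨p', s', l⟩ <;> simp

-- the core correspondence of A's inner scan with B's per-node scan
theorem scan_core (start endd cur : String) (p : List String) :
    ∀ (adj : List (List (String × String))) (visited' S : List String)
      (parent : PySem.Dict String String) (seen : List String),
    (∀ x, x ∈ S ↔ x ∈ seen) →
    (∀ x, x ∈ visited' → x ∈ seen) →
    Chain parent start cur p →
    (∀ x ∈ p, x ∈ seen) →
    (PySem.Dict.keys parent).Nodup →
    (∀ k ∈ PySem.Dict.keys parent, k ∈ seen) →
    (∃ r, scanA endd visited' p adj [] = .inl r ∧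
          scanNode start endd cur adj parent seen [] = .error r) ∨
    (∃ newA parent' seen' newB,
      scanA endd visited' p adj [] = .inr newA ∧
      scanNode start endd cur adj parent seen [] = .ok (parent', seen', newB) ∧
      nodesOf (eff S newA) = newB ∧
      (∀ n q, (n, q) ∈ eff S newA → q = p ++ [n]) ∧
      (∀ n q, Chain parent start n q → (∀ x ∈ q, x ∈ seen) → Chain parent' start n q) ∧
      (∀ n ∈ newB, Chain parent' start n (p ++ [n])) ∧
      (∀ x, x ∈ seen' ↔ x ∈ seen ∨ x ∈ newB) ∧
      newB.Nodup ∧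
      (∀ x ∈ newB, x ∉ seen ∧ x ∈ adj.map connectedDevice) ∧
      (PySem.Dict.keys parent').Nodup ∧
      (∀ k ∈ PySem.Dict.keys parent', k ∈ seen') ∧
      newA.length ≤ adj.length) := by
  intro adj
  induction adj with
  | nil =>
    intro visited' S parent seen hS hv hch hps hkn hks
    refine .inr ⟨[], parent, seen, [], by simp [scanA], by simp [scanNode], by simp [eff, nodesOf],
      by simp [eff], fun n q hc _ => hc, by simp, fun x => by simp, List.nodup_nil, by simp,
      hkn, hks, by simp⟩
  | cons conn rest ih =>
    intro visited' S parent seen hS hv hch hps hkn hks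
    by_cases h1 : connectedDevice conn = endd
    · refine .inl ⟨p ++ [endd], ?_, ?_⟩
      · simp only [scanA]; rw [if_pos h1, h1]
      · simp only [scanNode]; rw [if_pos h1, h1, recon_path hch hkn]
    · by_cases h2 : connectedDevice conn ∈ visited'
      · -- both sides skip (A because visited, B because seen ⊇ visited')
        have h2s : connectedDevice conn ∈ seen := hv _ h2
        have hA : scanA endd visited' p (conn :: rest) [] = scanA endd visited' p rest [] := by
          simp only [scanA]
          rw [if_neg h1, if_pos ((PySem.Set.contains_iff _ _).2 h2)]
        have hB : scanNode start endd cur (conn :: rest) parent seen [] =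
            scanNode start endd cur rest parent seen [] := by
          simp only [scanNode]
          rw [if_neg h1, if_pos ((PySem.Set.contains_iff _ _).2 h2s)]
        rw [hA, hB]
        rcases ih visited' S parent seen hS hv hch hps hkn hks with
          ⟨r, hra, hrb⟩ | ⟨newA, parent', seen', newB, hra, hrb, c1, c2, c3, c4, c5, c6, c7, c8, c9, c10⟩
        · exact .inl ⟨r, hra, hrb⟩
        · refine .inr ⟨newA, parent', seen', newB, hra, hrb, c1, c2, c3, c4, c5, c6, ?_, c8, c9,
            by simpa using Nat.le_succ_of_le c10⟩
          intro x hx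
          refine ⟨(c7 x hx).1, ?_⟩
          simp only [List.map_cons, List.mem_cons]
          exact .inr (c7 x hx).2
      · by_cases h3 : connectedDevice conn ∈ seen
        · -- A enqueues a duplicate (dropped later by eff); B skips
          have hA : scanA endd visited' p (conn :: rest) [] =
              match scanA endd visited' p rest [] with
              | .inl r => .inl r
              | .inr l => .inr ((connectedDevice conn, p ++ [connectedDevice conn]) :: l) := by
            simp only [scanA]
            rw [if_neg h1, if_neg (by simp [PySem.Set.contains_iff, h2])]
            rw [scanA_acc]
            simp
          have hB : scanNode start endd cur (conn :: rest) parent seen [] =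
              scanNode start endd cur rest parent seen [] := by
            simp only [scanNode]
            rw [if_neg h1, if_pos ((PySem.Set.contains_iff _ _).2 h3)]
          rw [hA, hB]
          rcases ih visited' S parent seen hS hv hch hps hkn hks with
            ⟨r, hra, hrb⟩ | ⟨newA, parent', seen', newB, hra, hrb, c1, c2, c3, c4, c5, c6, c7, c8, c9, c10⟩
          · exact .inl ⟨r, by rw [hra], hrb⟩
          · refine .inr ⟨(connectedDevice conn, p ++ [connectedDevice conn]) :: newA,
              parent', seen', newB, by rw [hra], hrb, ?_, ?_, c3, c4, c5, c6, ?_, c8, c9, by simp; omega⟩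
            · rw [eff, if_pos ((hS _).2 h3)]; exact c1
            · intro n q hq
              rw [eff, if_pos ((hS _).2 h3)] at hq
              exact c2 n q hq
            · intro x hx
              refine ⟨(c7 x hx).1, ?_⟩
              simp only [List.map_cons, List.mem_cons]
              exact .inr (c7 x hx).2
        · -- fresh node: A enqueues (node, path); B marks seen, records parent, enqueues node
          have h2f : connectedDevice conn ∉ visited' := h2
          have hcf : PySem.Dict.contains parent (connectedDevice conn) = false := by
            cases hcc : PySem.Dict.contains parent (connectedDevice conn)
            · rfl
            · exact absurd (hks _ ((PySem.Dict.contains_iff_mem_keys _ _).1 hcc)) h3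
          have hchp : Chain (PySem.Dict.insert parent (connectedDevice conn) cur) start cur p :=
            chain_preserve hch hps h3
          have hndp : connectedDevice conn ∉ p := fun hin => h3 (hps _ hin)
          have hchn : Chain (PySem.Dict.insert parent (connectedDevice conn) cur) start
              (connectedDevice conn) (p ++ [connectedDevice conn]) :=
            .step hchp (PySem.Dict.get?_insert_self _ _ _) hndp
          have hA : scanA endd visited' p (conn :: rest) [] =
              match scanA endd visited' p rest [] with
              | .inl r => .inl r
              | .inr l => .inr ((connectedDevice conn, p ++ [connectedDevice conn]) :: l) := by
            simp only [scanA]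
            rw [if_neg h1, if_neg (by simp [PySem.Set.contains_iff, h2])]
            rw [scanA_acc]
            simp
          have hB : scanNode start endd cur (conn :: rest) parent seen [] =
              match scanNode start endd cur rest (PySem.Dict.insert parent (connectedDevice conn) cur)
                  (PySem.Set.add seen (connectedDevice conn)) [] with
              | .error r => .error r
              | .ok (p', s', l) => .ok (p', s', connectedDevice conn :: l) := by
            simp only [scanNode]
            rw [if_neg h1, if_neg (by simp [PySem.Set.contains_iff, h3])]
            rw [scanNode_acc]
            rcases scanNode start endd cur rest (PySem.Dict.insert parent (connectedDevice conn) cur)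
                (PySem.Set.add seen (connectedDevice conn)) [] with r | ⟨p', s', l⟩ <;> simp
          have hSmem : ∀ x, x ∈ (connectedDevice conn :: S) ↔ x ∈ PySem.Set.add seen (connectedDevice conn) := by
            intro x
            rw [PySem.Set.mem_add]
            simp only [List.mem_cons, hS x]
            tauto
          have hvmem : ∀ x, x ∈ visited' → x ∈ PySem.Set.add seen (connectedDevice conn) := by
            intro x hx
            rw [PySem.Set.mem_add]
            exact .inl (hv x hx)
          have hpsn : ∀ x ∈ p, x ∈ PySem.Set.add seen (connectedDevice conn) := by
            intro x hx
            rw [PySem.Set.mem_add]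
            exact .inl (hps x hx)
          have hknn : (PySem.Dict.keys (PySem.Dict.insert parent (connectedDevice conn) cur)).Nodup :=
            PySem.Dict.nodup_keys_insert _ _ _ hkn
          have hksn : ∀ k ∈ PySem.Dict.keys (PySem.Dict.insert parent (connectedDevice conn) cur),
              k ∈ PySem.Set.add seen (connectedDevice conn) := by
            intro k hk
            rw [PySem.Dict.keys_insert_of_not_contains _ _ hcf] at hk
            rw [PySem.Set.mem_add]
            rcases List.mem_append.1 hk with hk | hk
            · exact .inl (hks k hk)
            · exact .inr (by simpa using hk)
          rcases ih visited' (connectedDevice conn :: S)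
              (PySem.Dict.insert parent (connectedDevice conn) cur)
              (PySem.Set.add seen (connectedDevice conn))
              hSmem hvmem hchp hpsn hknn hksn with
            ⟨r, hra, hrb⟩ | ⟨newA, parent', seen', newB, hra, hrb, c1, c2, c3, c4, c5, c6, c7, c8, c9, c10⟩
          · exact .inl ⟨r, by rw [hA, hra], by rw [hB, hrb]⟩
          · have hndS : connectedDevice conn ∉ S := fun hx => h3 ((hS _).1 hx)
            refine .inr ⟨(connectedDevice conn, p ++ [connectedDevice conn]) :: newA,
              parent', seen', connectedDevice conn :: newB,
              by rw [hA, hra], by rw [hB, hrb], ?_, ?_, ?_, ?_, ?_, ?_, ?_, c8, c9, by simp; omega⟩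
            · simp only [nodesOf] at c1 ⊢
              rw [eff, if_neg hndS]
              simp only [List.map_cons, c1]
            · intro n q hq
              rw [eff, if_neg hndS] at hq
              rcases List.mem_cons.1 hq with hq | hq
              · rw [Prod.mk.injEq] at hq
                rw [hq.2, hq.1]
              · exact c2 n q hq
            · intro n q hcq hqs
              refine c3 n q (chain_preserve hcq hqs h3) ?_
              intro x hx
              rw [PySem.Set.mem_add]
              exact .inl (hqs x hx)
            · intro n hn
              rcases List.mem_cons.1 hn with hn | hn
              · subst hn
                refine c3 _ _ hchn ?_
                intro x hx
                rw [PySem.Set.mem_add]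
                rcases List.mem_append.1 hx with hx | hx
                · exact .inl (hps x hx)
                · exact .inr (by simpa using hx)
              · exact c4 n hn
            · intro x
              rw [c5 x, PySem.Set.mem_add]
              simp only [List.mem_cons]
              tauto
            · refine List.nodup_cons.2 ⟨fun hin => ?_, c6⟩
              have := (c7 _ hin).1
              rw [PySem.Set.mem_add] at this
              exact this (.inr rfl)
            · intro x hx
              rcases List.mem_cons.1 hx with hx | hx
              · subst hx
                exact ⟨h3, by simp⟩
              · have := c7 x hx
                rw [PySem.Set.mem_add] at this
                refine ⟨fun hs => this.1 (.inl hs), ?_⟩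
                simp only [List.map_cons, List.mem_cons]
                exact .inr this.2

theorem weightA_congr (rels : List (String × List (List (String × String)))) {v w : List String}
    (h : ∀ x, x ∈ v ↔ x ∈ w) : weightA rels v = weightA rels w := by
  unfold weightA
  rw [show rels.filter (fun pr => !decide (pr.1 ∈ v)) = rels.filter (fun pr => !decide (pr.1 ∈ w)) from
    List.filter_congr (fun pr _ => by simp [h pr.1])]

theorem weightA_mono (rels : List (String × List (List (String × String)))) {v w : List String}
    (h : ∀ x, x ∈ v → x ∈ w) : weightA rels w ≤ weightA rels v := by
  induction rels with
  | nil => simp [weightA]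
  | cons pr rest ih =>
    by_cases hv : pr.1 ∈ v
    · rw [weightA, weightA, List.filter_cons, List.filter_cons]
      simp only [hv, h pr.1 hv, decide_true, Bool.not_true, if_false]
      exact ih
    · by_cases hw : pr.1 ∈ w
      · rw [weightA, weightA, List.filter_cons, List.filter_cons]
        simp only [hv, hw, decide_true, decide_false, Bool.not_true, Bool.not_false, if_true, if_false]
        simp only [List.map_cons, List.sum_cons]
        calc weightA rest w ≤ weightA rest v := ih
          _ ≤ pr.2.length + weightA rest v := Nat.le_add_left _ _
      · rw [weightA, weightA, List.filter_cons, List.filter_cons]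
        simp only [hv, hw, decide_false, Bool.not_false, if_true]
        simp only [List.map_cons, List.sum_cons]
        exact Nat.add_le_add_left ih _

theorem weightA_add (rels : List (String × List (List (String × String)))) {v : List String} {cur : String}
    (h : cur ∉ v) :
    weightA rels (cur :: v) +
      ((PySem.Dict.get? (⟨rels⟩ : PySem.Dict String (List (List (String × String)))) cur).getD []).length
      ≤ weightA rels v := by
  induction rels with
  | nil => simp [weightA, PySem.Dict.get?]
  | cons pr rest ih =>
    unfold weightA
    rw [List.filter_cons, List.filter_cons]
    by_cases hc : pr.1 = cur
    · have hget : (PySem.Dict.get? (⟨pr :: rest⟩ : PySem.Dict String (List (List (String × String)))) cur) = some pr.2 := by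
        simp only [PySem.Dict.get?]
        rw [List.find?_cons_of_pos (by simp [hc])]
        rfl
      rw [hget]
      rw [show (!decide (pr.1 ∈ cur :: v)) = false by simp [hc],
          show (!decide (pr.1 ∈ v)) = true by simp [hc, h]]
      simp only [Bool.false_eq_true, if_true, if_false, List.map_cons, List.sum_cons, Option.getD_some]
      have hmono := weightA_mono rest (v := v) (w := cur :: v) (fun x hx => by simp [hx])
      unfold weightA at hmono
      omega
    · have hget : (PySem.Dict.get? (⟨pr :: rest⟩ : PySem.Dict String (List (List (String × String)))) cur) =
          (PySem.Dict.get? (⟨rest⟩ : PySem.Dict String (List (List (String × String)))) cur) := by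
        simp only [PySem.Dict.get?]
        rw [List.find?_cons_of_neg (by simp [hc])]
      rw [hget]
      unfold weightA at ih
      by_cases hv : pr.1 ∈ v
      · rw [show (!decide (pr.1 ∈ cur :: v)) = false by simp [hv],
            show (!decide (pr.1 ∈ v)) = false by simp [hv]]
        simp only [Bool.false_eq_true, if_false]
        exact ih
      · rw [show (!decide (pr.1 ∈ cur :: v)) = true by simp [hc, hv],
            show (!decide (pr.1 ∈ v)) = true by simp [hv]]
        simp only [if_true, List.map_cons, List.sum_cons]
        omega

theorem adj_sub_uniVals (rels : List (String × List (List (String × String)))) (cur : String) :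
    ∀ x ∈ ((PySem.Dict.get? (⟨rels⟩ : PySem.Dict String (List (List (String × String)))) cur).getD []).map connectedDevice,
      x ∈ uniVals rels := by
  intro x hx
  rcases hget : PySem.Dict.get? (⟨rels⟩ : PySem.Dict String (List (List (String × String)))) cur with _ | adj
  · rw [hget] at hx; simp at hx
  · rw [hget] at hx
    simp only [Option.getD_some] at hx
    have hmem : (cur, adj) ∈ rels := by
      simp only [PySem.Dict.get?, Option.map_eq_some_iff] at hget
      obtain ⟨pr, hfind, hpr⟩ := hget
      have h1 := List.mem_of_find?_eq_some hfind
      have h2 := List.find?_some hfind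
      simp at h2
      obtain ⟨a, b⟩ := pr
      simp at h2 hpr
      rw [h2, hpr] at h1
      exact h1
    unfold uniVals
    rw [List.mem_flatMap]
    exact ⟨(cur, adj), hmem, hx⟩

theorem remB_step (rels : List (String × List (List (String × String)))) {seen seen' newB : List String}
    (hnd : newB.Nodup) (hn : ∀ x ∈ newB, x ∉ seen ∧ x ∈ uniVals rels)
    (hs : ∀ x, x ∈ seen' ↔ x ∈ seen ∨ x ∈ newB) :
    remB rels seen' + newB.length ≤ remB rels seen := by
  unfold remB
  rw [← List.countP_eq_length_filter, ← List.countP_eq_length_filter]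
  set D := PySem.List.dedup (uniVals rels) with hD
  have hsplit := List.countP_eq_countP_filter_add D (fun x => !decide (x ∈ seen)) (fun x => decide (x ∈ newB))
  have hsplit' := List.countP_eq_countP_filter_add D (fun x => !decide (x ∈ seen')) (fun x => decide (x ∈ newB))
  have hz : (D.filter (fun x => decide (x ∈ newB))).countP (fun x => !decide (x ∈ seen')) = 0 := by
    rw [List.countP_eq_zero]
    intro x hx
    rw [List.mem_filter] at hx
    have : x ∈ seen' := (hs x).2 (.inr (by simpa using hx.2))
    simp [this]
  have heq : (D.filter (fun a => !decide (a ∈ newB))).countP (fun x => !decide (x ∈ seen')) =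
      (D.filter (fun a => !decide (a ∈ newB))).countP (fun x => !decide (x ∈ seen)) := by
    apply List.countP_congr
    intro x hx
    rw [List.mem_filter] at hx
    have hxB : x ∉ newB := by simpa using hx.2
    have : (x ∈ seen) ↔ (x ∈ seen') := by
      rw [hs x]
      simp [hxB]
    simp [this]
  have h1 : newB.length ≤
      (D.filter (fun x => decide (x ∈ newB))).countP (fun x => !decide (x ∈ seen)) := by
    rw [List.countP_eq_length_filter, List.filter_filter]
    have hsub : newB ⊆ D.filter (fun a => !decide (a ∈ seen) && decide (a ∈ newB)) := by
      intro x hx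
      rw [List.mem_filter]
      refine ⟨?_, by simp [hx, (hn x hx).1]⟩
      rw [hD, PySem.List.mem_dedup]
      exact (hn x hx).2
    exact List.Subperm.length_le (List.subperm_of_subset hnd hsub)
  omega

theorem remB_le (rels : List (String × List (List (String × String)))) (seen : List String) :
    remB rels seen ≤ totalConns rels := by
  unfold remB
  calc ((PySem.List.dedup (uniVals rels)).filter _).length
      ≤ (PySem.List.dedup (uniVals rels)).length := List.length_filter_le _ _
    _ ≤ (uniVals rels).length := by
        simp only [PySem.List.dedup_eq_ofList, PySem.Set.length_ofList_le]
    _ = totalConns rels := by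
        unfold uniVals totalConns
        rw [List.length_flatMap]
        congr 1
        apply List.map_congr_left
        intro pr _
        rw [List.length_map]

-- the invariant tying A's state (qa, visited) to B's state (frontier ++ nfAcc, parent, seen)
structure SimInv (start : String) (rels : List (String × List (List (String × String))))
    (qa : List (String × List String)) (visited : List String)
    (qb : List String) (parent : PySem.Dict String String) (seen : List String) : Prop where
  hqb : qb = nodesOf (eff visited qa)
  hseen : ∀ x, x ∈ seen ↔ x ∈ visited ∨ x ∈ qb
  hchain : ∀ n p, (n, p) ∈ eff visited qa → Chain parent start n p ∧ (∀ x ∈ p, x ∈ seen)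
  hkeys : (PySem.Dict.keys parent).Nodup
  hkeysub : ∀ k ∈ PySem.Dict.keys parent, k ∈ seen

theorem sim (start endd : String) (rels : List (String × List (List (String × String)))) :
    ∀ (N fa fb : Nat) (frontier nfAcc : List String) (qa : List (String × List String))
      (visited : List String) (parent : PySem.Dict String String) (seen : List String),
    fa + fb ≤ N →
    SimInv start rels qa visited (frontier ++ nfAcc) parent seen →
    qa.length + weightA rels visited ≤ fa →
    remB rels seen + 1 ≤ fb →
    (nfAcc ≠ [] → remB rels seen + 2 ≤ fb) →
    loopA endd rels fa qa visited =
      (match expand start endd rels frontier parent seen nfAcc with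
       | .error r => some r
       | .ok (parent', seen', nf) => levels start endd rels fb nf parent' seen') := by
  intro N
  induction N with
  | zero =>
    intro fa fb frontier nfAcc qa visited parent seen hN hinv hfa hfb hfb2
    omega
  | succ N ih =>
    intro fa fb frontier nfAcc qa visited parent seen hN hinv hfa hfb hfb2
    rcases qa with _ | ⟨⟨cur, p⟩, qs⟩
    · have h0 : frontier ++ nfAcc = ([] : List String) := by
        simpa [eff, nodesOf] using hinv.hqb
      rcases List.append_eq_nil_iff.1 h0 with ⟨hf, hn⟩
      subst hf; subst hn
      cases fa <;> cases fb <;> simp [loopA, levels, expand]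
    · by_cases hv : cur ∈ visited
      · -- A skips the already-visited entry; B's state is untouched
        have heff : eff visited ((cur, p) :: qs) = eff visited qs := by
          rw [eff, if_pos hv]
        obtain ⟨fa', rfl⟩ : ∃ fa', fa = fa' + 1 := ⟨fa - 1, by simp at hfa; omega⟩
        rw [loopA, if_pos ((PySem.Set.contains_iff _ _).2 hv)]
        exact ih fa' fb frontier nfAcc qs visited parent seen (by omega)
          ⟨by rw [hinv.hqb, heff], hinv.hseen,
           fun n q hq => hinv.hchain n q (by rw [heff]; exact hq),
           hinv.hkeys, hinv.hkeysub⟩ (by simp at hfa ⊢; omega) hfb hfb2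
      · have heff : eff visited ((cur, p) :: qs) = (cur, p) :: eff (cur :: visited) qs := by
          rw [eff, if_neg hv]
        have hqbc : frontier ++ nfAcc = cur :: nodesOf (eff (cur :: visited) qs) := by
          rw [hinv.hqb, heff, nodesOf, List.map_cons]
          rfl
        rcases frontier with _ | ⟨cur', rest⟩
        · -- frontier exhausted: B rolls next_frontier over into a new round
          simp only [List.nil_append] at hqbc
          have hne : nfAcc ≠ [] := by rw [hqbc]; simp
          obtain ⟨g, rfl⟩ : ∃ g, fb = g + 1 := ⟨fb - 1, by have := hfb2 hne; omega⟩
          have hfb2' := hfb2 hne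
          simp only [expand]
          rw [hqbc]
          simp only [levels]
          rw [← hqbc]
          exact ih fa g nfAcc [] ((cur, p) :: qs) visited parent seen (by omega)
            ⟨by simpa using hinv.hqb, by simpa using hinv.hseen, hinv.hchain,
             hinv.hkeys, hinv.hkeysub⟩ hfa (by omega) (fun h => absurd rfl h)
        · -- A pops cur; B scans cur, the head of the current frontier
          have hcur : cur' = cur := by
            have := hqbc
            rw [List.cons_append] at this
            exact (List.cons_eq_cons.1 this).1
          subst cur'
          have hrest : rest ++ nfAcc = nodesOf (eff (cur :: visited) qs) := by
            have := hqbc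
            rw [List.cons_append] at this
            exact (List.cons_eq_cons.1 this).2
          obtain ⟨fa', rfl⟩ : ∃ fa', fa = fa' + 1 := ⟨fa - 1, by simp at hfa; omega⟩
          have hvadd : ∀ x, x ∈ PySem.Set.add visited cur ↔ x ∈ cur :: visited := by
            intro x
            rw [PySem.Set.mem_add]
            simp
            tauto
          have heffv : eff (PySem.Set.add visited cur) qs = eff (cur :: visited) qs :=
            eff_congr hvadd qs
          have hS : ∀ x, x ∈ effAcc (PySem.Set.add visited cur) qs ↔ x ∈ seen := by
            intro x
            rw [effAcc_mem, heffv, hinv.hseen x, hqbc]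
            rw [hvadd x]
            simp
            tauto
          have hv2 : ∀ x, x ∈ PySem.Set.add visited cur → x ∈ seen := by
            intro x hx
            rw [hvadd x] at hx
            rw [hinv.hseen x, hqbc]
            rcases List.mem_cons.1 hx with hx | hx
            · exact .inr (by simp [hx])
            · exact .inl hx
          have hhead := hinv.hchain cur p (by rw [heff]; exact List.mem_cons_self ..)
          rw [loopA, if_neg (by simp [PySem.Set.contains_iff, hv])]
          simp only [expand, adjOf]
          rw [scanNode_acc]
          rcases scan_core start endd cur p
              ((PySem.Dict.get? (⟨rels⟩ : PySem.Dict String (List (List (String × String)))) cur).getD [])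
              (PySem.Set.add visited cur) (effAcc (PySem.Set.add visited cur) qs) parent seen
              hS hv2 hhead.1 hhead.2 hinv.hkeys hinv.hkeysub with
            ⟨r, hra, hrb⟩ | ⟨newA, parent', seen', newB, hra, hrb, c1, c2, c3, c4, c5, c6, c7, c8, c9, c10⟩
          · simp only [hra, hrb]
          · simp only [hra, hrb]
            have hadjU : ∀ x ∈ newB, x ∉ seen ∧ x ∈ uniVals rels := by
              intro x hx
              exact ⟨(c7 x hx).1, adj_sub_uniVals rels cur x (c7 x hx).2⟩
            have hstep := remB_step rels c6 hadjU c5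
            apply ih fa' fb rest (nfAcc ++ newB) (qs ++ newA) (PySem.Set.add visited cur)
              parent' seen' (by omega)
            · refine ⟨?_, ?_, ?_, c8, c9⟩
              · unfold nodesOf
                rw [eff_append, heffv, List.map_append]
                rw [show (eff (effAcc (PySem.Set.add visited cur) qs) newA).map Prod.fst = newB from c1]
                rw [← List.append_assoc, hrest]
                rfl
              · intro x
                rw [c5 x, hinv.hseen x, hqbc, hvadd x, ← List.append_assoc, hrest]
                simp only [List.cons_append, List.mem_append, List.mem_cons]
                tauto
              · intro n q hq
                rw [eff_append] at hq
                rcases List.mem_append.1 hq with hq | hq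
                · rw [heffv] at hq
                  have hold := hinv.hchain n q (by rw [heff]; exact List.mem_cons_of_mem _ hq)
                  refine ⟨c3 n q hold.1 hold.2, fun x hx => ?_⟩
                  rw [c5 x]
                  exact .inl (hold.2 x hx)
                · have hnB : n ∈ newB := by
                    rw [← c1]
                    exact List.mem_map_of_mem hq
                  have hq2 := c2 n q hq
                  subst hq2
                  refine ⟨c4 n hnB, fun x hx => ?_⟩
                  rw [c5 x]
                  rcases List.mem_append.1 hx with hx | hx
                  · exact .inl (hhead.2 x hx)
                  · simp only [List.mem_singleton] at hx
                    subst hx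
                    exact .inr hnB
            · have hwadd := weightA_add rels (v := visited) (cur := cur) hv
              have hwc : weightA rels (PySem.Set.add visited cur) = weightA rels (cur :: visited) :=
                weightA_congr rels hvadd
              simp only [List.length_append, List.length_cons] at hfa ⊢
              omega
            · omega
            · intro hne'
              by_cases h0 : nfAcc = []
              · subst h0
                simp only [List.nil_append] at hne'
                have := List.length_pos_of_ne_nil hne'
                omega
              · have := hfb2 h0
                omega

theorem weightA_nil (rels : List (String × List (List (String × String)))) :
    weightA rels [] = totalConns rels := by
  unfold weightA totalConns
  rw [show rels.filter (fun pr => !decide (pr.1 ∈ ([] : List String))) = rels from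
    List.filter_eq_self.2 (fun pr _ => by simp)]

-- ===== VERDICT (by name: the statement is the Claim_ definition above) =====
theorem find_network_path_spec : Claim_equal_find_network_path := by
  intro start_device end_device relationships _ _
  unfold Spec_find_network_path find_network_path find_network_path_alt
  by_cases h1 : start_device = end_device
  · rw [if_pos h1, if_pos h1]
  · rw [if_neg h1, if_neg h1]
    by_cases h2 : (PySem.Dict.contains (⟨relationships⟩ : PySem.Dict String (List (List (String × String)))) start_device
        && PySem.Dict.contains (⟨relationships⟩ : PySem.Dict String (List (List (String × String)))) end_device) = true
    · rw [Bool.and_eq_true] at h2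
      obtain ⟨ha, hb⟩ := h2
      rw [if_neg (by simp [ha, hb]), if_neg (by simp [ha, hb])]
      have hT : totalConns relationships + 2 = (totalConns relationships + 1) + 1 := rfl
      rw [hT]
      simp only [levels]
      refine sim start_device end_device relationships
        ((totalConns relationships + 1) + (totalConns relationships + 1))
        (totalConns relationships + 1) (totalConns relationships + 1)
        [start_device] [] [(start_device, [start_device])] PySem.Set.empty PySem.Dict.empty
        (PySem.Set.add PySem.Set.empty start_device) le_rfl ?_ ?_ ?_ (fun h => absurd rfl h)
      · refine ⟨by simp [eff, nodesOf], ?_, ?_, by simp [PySem.Dict.keys_empty], by simp [PySem.Dict.keys_empty]⟩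
        · intro x
          rw [PySem.Set.mem_add]
          simp [PySem.Set.empty]
        · intro n p hm
          simp only [eff, if_false] at hm
          rcases List.mem_cons.1 hm with hm | hm
          · rw [Prod.mk.injEq] at hm
            rw [hm.1, hm.2]
            refine ⟨.base, ?_⟩
            intro x hx
            simp only [List.mem_singleton] at hx
            rw [hx, PySem.Set.mem_add]
            exact .inr rfl
          · simp [eff] at hm
      · rw [show weightA relationships PySem.Set.empty = totalConns relationships from
            weightA_nil relationships]
        simp [Nat.add_comm]
      · have := remB_le relationships (PySem.Set.add PySem.Set.empty start_device)
        omega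
    · have hob : ∀ a b : Bool, ¬((a && b) = true) → ((!a || !b) = true ∧ (!(a && b)) = true) := by decide
      rw [if_pos (hob _ _ h2).1, if_pos (hob _ _ h2).2]
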